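-- pv_equiv track=rewrite | github.com/markplotlib/data-structures | primitives/array_bomb_defusal.py | decrypt
-- ===== SOURCE A (Python) =====
-- def decrypt(code: list, k: int) -> list:
--     arr = [0 for i in code]
--     i = 0
--     h = 0
--
--     if k > 0:
--         sign = 1
--     elif k < 0:
--         sign = -1
--     else:
--         sign = 0
--
--     while h != len(code):
--         j = 0
--         sum = 0
--         while j != k:
--             ind = (i+j+sign) % len(code)
--             sum += code[ind]
--             j += sign
--
--         ind = (i+j+sign) % len(code)
--         arr[sign*h] = sum
--         i += sign
--         h += 1
--
--     return arr
-- ===== SOURCE B (Python) =====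
-- def decrypt(code, k):
--     n = len(code)
--     res = [0] * n
--     if n == 0 or k == 0:
--         return res
--     total = sum(code)
--     q, r = divmod(abs(k), n)
--     pre = [0]
--     for x in code:
--         pre.append(pre[-1] + x)
--     for i in range(n):
--         s = (i + 1) % n if k > 0 else (i - r) % n
--         e = s + r
--         if e <= n:
--             window = pre[e] - pre[s]
--         else:
--             window = (pre[n] - pre[s]) + pre[e - n]
--         res[i] = q * total + window
--     return res
-- ===== Notes on version B (the rewrite author's own statement) =====
-- stated objective: faster
-- what changed: Replaced the O(n*|k|) per-index rescan (inner while loop summing |k| elements for each of the n outputs) by one prefix-sum array plus a divmod decomposition of |k| into whole cycles and a remainder window, giving each output in O(1) after O(n) preprocessing.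
import Mathlib
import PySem

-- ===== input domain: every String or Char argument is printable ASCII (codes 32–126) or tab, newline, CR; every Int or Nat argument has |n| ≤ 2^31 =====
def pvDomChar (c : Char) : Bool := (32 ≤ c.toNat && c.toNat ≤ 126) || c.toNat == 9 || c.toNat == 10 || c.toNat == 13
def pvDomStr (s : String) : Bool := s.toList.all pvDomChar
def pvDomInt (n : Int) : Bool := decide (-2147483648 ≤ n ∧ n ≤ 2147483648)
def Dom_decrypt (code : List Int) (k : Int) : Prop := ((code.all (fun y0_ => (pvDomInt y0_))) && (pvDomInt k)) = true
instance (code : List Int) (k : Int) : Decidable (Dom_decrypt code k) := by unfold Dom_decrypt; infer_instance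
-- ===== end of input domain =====

-- B replaces A's per-index rescan of |k| elements by one prefix-sum pass plus a divmod of |k|
-- into whole cycles and a remainder window (objective: faster).
-- ===== PORT A =====
-- inner 'while j != k': j steps by sign towards k, so it runs |k| times (fuel = k.natAbs);
-- code[ind] with ind = (i+j+sign) % len(code) has ind ∈ [0, len) whenever the loop runs, so pyGetD is exact.
def decryptInner (code : List Int) (i sign : Int) : Nat → Int → Int → Int
  | 0, _, sum => sum
  | f + 1, j, sum =>
      let ind := PySem.Int.mod (i + j + sign) (code.length : Int)
      decryptInner code i sign f (j + sign) (sum + PySem.List.pyGetD code ind 0)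

-- outer 'while h != len(code)': h goes 0,1,…, so it runs len(code) times (fuel = len);
-- arr[sign*h] = sum is Python (possibly negative-index) list assignment, always in range: pySetD is exact.
def decryptOuter (code : List Int) (k sign : Int) : Nat → Int → Int → List Int → List Int
  | 0, _, _, arr => arr
  | f + 1, i, h, arr =>
      let sum := decryptInner code i sign k.natAbs 0 0
      let arr' := PySem.List.pySetD arr (sign * h) sum
      decryptOuter code k sign f (i + sign) (h + 1) arr'

def decrypt (code : List Int) (k : Int) : List Int :=
  let arr := code.map (fun _ => (0 : Int))
  let sign : Int := if k > 0 then 1 else if k < 0 then -1 else 0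
  decryptOuter code k sign code.length 0 0 arr

-- ===== PORT B =====
-- prefix sums: pre = [0]; for x in code: pre.append(pre[-1] + x)  — this running-sum loop is scanl (+) 0;
-- all indices into pre lie in [0, len(code)], so pyGetD is exact.
def decrypt_alt (code : List Int) (k : Int) : List Int :=
  let n : Int := (code.length : Int)
  if code.length = 0 ∨ k = 0 then List.replicate code.length (0 : Int)
  else
    let total := code.sum
    let q := PySem.Int.floordiv |k| n
    let r := PySem.Int.mod |k| n
    let pre := List.scanl (· + ·) (0 : Int) code
    (List.range code.length).map (fun (i : Nat) =>
      let s := if k > 0 then PySem.Int.mod ((i : Int) + 1) n else PySem.Int.mod ((i : Int) - r) n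
      let e := s + r
      let window :=
        if e ≤ n then PySem.List.pyGetD pre e 0 - PySem.List.pyGetD pre s 0
        else (PySem.List.pyGetD pre n 0 - PySem.List.pyGetD pre s 0) + PySem.List.pyGetD pre (e - n) 0
      q * total + window)

-- ===== PRECONDITION & SPEC =====
def Spec_decrypt (code : List Int) (k : Int) (out : List Int) : Prop := out = decrypt_alt code k
instance (code : List Int) (k : Int) (out : List Int) : Decidable (Spec_decrypt code k out) := by unfold Spec_decrypt; infer_instance

-- ===== CLAIM (what is proved, stated in full; the proofs are below) =====
def Claim_equal_decrypt : Prop := ∀ (code : List Int) (k : Int), Dom_decrypt code k → Spec_decrypt code k (decrypt code k)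

-- ===== LEMMAS AND PROOFS =====

-- circular access code[t % n] and circular sums S s m = Σ_{t<m} code[(s+t) % n]
def cget (code : List Int) (t : Int) : Int :=
  PySem.List.pyGetD code (PySem.Int.mod t (code.length : Int)) 0

def S (code : List Int) : Int → Nat → Int
  | _, 0 => 0
  | s, m + 1 => cget code s + S code (s + 1) m

theorem S_succ_right (code : List Int) (s : Int) (m : Nat) :
    S code s (m + 1) = S code s m + cget code (s + m) := by
  induction m generalizing s with
  | zero => simp [S]
  | succ m ih =>
      show cget code s + S code (s + 1) (m + 1) = S code s (m + 1) + cget code (s + ↑(m + 1))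
      rw [ih]
      show _ = cget code s + S code (s + 1) m + cget code (s + ↑(m + 1))
      rw [show s + 1 + (m : Int) = s + ↑(m + 1) by push_cast; ring]
      ring

theorem cget_add_len (code : List Int) (t : Int) :
    cget code (t + code.length) = cget code t := by
  unfold cget
  by_cases h : code.length = 0
  · simp [h]
  · have hp : (0 : Int) < (code.length : Int) := by exact_mod_cast Nat.pos_of_ne_zero h
    rw [PySem.Int.mod_eq_emod_of_pos hp, PySem.Int.mod_eq_emod_of_pos hp, Int.add_emod_right]

theorem S_shift (code : List Int) (s : Int) (m : Nat) :
    S code (s + code.length) m = S code s m := by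
  induction m generalizing s with
  | zero => rfl
  | succ m ih =>
      show cget code (s + code.length) + S code (s + code.length + 1) m
          = cget code s + S code (s + 1) m
      rw [cget_add_len]
      rw [show s + (code.length : Int) + 1 = s + 1 + code.length by ring, ih (s + 1)]

theorem S_congr (code : List Int) (s : Int) (c : Int) (m : Nat) :
    S code (s + c * code.length) m = S code s m := by
  induction c using Int.induction_on with
  | zero => simp
  | succ c ih =>
      rw [show s + ((c : Int) + 1) * (code.length : Int) = (s + c * code.length) + code.length by ring,
        S_shift, ih]
  | pred c ih =>
      have h : s + (-(c : Int) - 1) * (code.length : Int) + code.length = s + (-(c : Int)) * code.length := by ring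
      calc S code (s + (-(c : Int) - 1) * (code.length : Int)) m
          = S code (s + (-(c : Int) - 1) * (code.length : Int) + code.length) m := (S_shift _ _ _).symm
        _ = S code s m := by rw [h, ih]

theorem S_arg_congr (code : List Int) (a b : Int) (m : Nat) (h : a = b) :
    S code a m = S code b m := by rw [h]

theorem S_add (code : List Int) (s : Int) (a b : Nat) :
    S code s (a + b) = S code s a + S code (s + a) b := by
  induction a generalizing s with
  | zero => simp [S]
  | succ a ih =>
      rw [show a + 1 + b = (a + b) + 1 by omega]
      show cget code s + S code (s + 1) (a + b) = S code s (a + 1) + S code (s + ↑(a + 1)) b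
      rw [ih]
      show _ = cget code s + S code (s + 1) a + S code (s + ↑(a + 1)) b
      rw [show s + 1 + (a : Int) = s + ↑(a + 1) by push_cast; ring]
      ring

theorem S_nat_take (code : List Int) (m : Nat) : ∀ (s : Nat), s + m ≤ code.length →
    S code (s : Int) m = ((code.drop s).take m).sum := by
  induction m with
  | zero => intro s _; simp [S]
  | succ m ih =>
      intro s h
      have hs : s < code.length := by omega
      have hdrop : code.drop s = code[s] :: code.drop (s + 1) := List.drop_eq_getElem_cons hs
      have hc : cget code (s : Int) = code[s] := by
        unfold cget
        have hp : (0 : Int) < (code.length : Int) := by exact_mod_cast (by omega : 0 < code.length)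
        rw [PySem.Int.mod_eq_emod_of_pos hp]
        rw [Int.emod_eq_of_lt (by positivity) (by exact_mod_cast hs)]
        simp [List.getD_eq_getElem?_getD, hs]
      show cget code (s : Int) + S code ((s : Int) + 1) m = _
      rw [hc, show ((s : Int) + 1) = ((s + 1 : Nat) : Int) by push_cast; ring,
        ih (s + 1) (by omega), hdrop, List.take_succ_cons, List.sum_cons]

theorem S_full (code : List Int) (s : Int) (hn : 0 < code.length) :
    S code s code.length = code.sum := by
  have step : ∀ t : Int, S code (t + 1) code.length = S code t code.length := by
    intro t
    obtain ⟨n, hn'⟩ : ∃ n, code.length = n + 1 := ⟨code.length - 1, by omega⟩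
    conv_lhs => rw [hn']
    conv_rhs => rw [hn']
    rw [S_succ_right]
    show S code (t + 1) n + cget code (t + 1 + n) = cget code t + S code (t + 1) n
    rw [show t + 1 + (n : Int) = t + ((n + 1 : Nat) : Int) by push_cast; ring, ← hn', cget_add_len]
    ring
  have all0 : ∀ t : Int, S code t code.length = S code 0 code.length := by
    intro t
    induction t using Int.induction_on with
    | zero => rfl
    | succ c ih => rw [step, ih]
    | pred c ih => rw [← ih, ← step]; norm_num
  rw [all0 s]
  have := S_nat_take code code.length 0 (by omega)
  simpa using this

theorem S_cycles (code : List Int) (s : Int) (c : Nat) (hn : 0 < code.length) :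
    S code s (c * code.length) = c * code.sum := by
  induction c generalizing s with
  | zero => simp [S]
  | succ c ih =>
      rw [show (c + 1) * code.length = code.length + c * code.length by ring]
      rw [S_add, S_full code s hn, ih]
      push_cast
      ring

-- ===== A-side characterization =====

theorem innerPos (code : List Int) (i : Int) (f : Nat) :
    ∀ (j sum : Int), decryptInner code i 1 f j sum = sum + S code (i + j + 1) f := by
  induction f with
  | zero => intro j sum; simp [decryptInner, S]
  | succ f ih =>
      intro j sum
      show decryptInner code i 1 f (j + 1)
            (sum + PySem.List.pyGetD code (PySem.Int.mod (i + j + 1) (code.length : Int)) 0) = _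
      rw [ih]
      show sum + cget code (i + j + 1) + S code (i + (j + 1) + 1) f
          = sum + (cget code (i + j + 1) + S code (i + j + 1 + 1) f)
      rw [show i + (j + 1) + 1 = i + j + 1 + 1 by ring]
      ring

theorem innerNeg (code : List Int) (i : Int) (f : Nat) :
    ∀ (j sum : Int), decryptInner code i (-1) f j sum = sum + S code (i + j - f) f := by
  induction f with
  | zero => intro j sum; simp [decryptInner, S]
  | succ f ih =>
      intro j sum
      show decryptInner code i (-1) f (j + -1)
            (sum + PySem.List.pyGetD code (PySem.Int.mod (i + j + -1) (code.length : Int)) 0) = _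
      rw [ih]
      have hsr : S code (i + j - (↑(f + 1) : Int)) (f + 1)
          = S code (i + j - (↑(f + 1) : Int)) f + cget code (i + j - (↑(f + 1) : Int) + f) := S_succ_right ..
      rw [hsr]
      rw [show i + (j + -1) - (f : Int) = i + j - ((f + 1 : Nat) : Int) by push_cast; ring]
      rw [show i + j - ((f + 1 : Nat) : Int) + (f : Int) = i + j + -1 by push_cast; ring]
      show sum + cget code (i + j + -1) + S code (i + j - ((f + 1 : Nat) : Int)) f = _
      ring

theorem take_set_succ {α : Type} (l : List α) (h : Nat) (v : α) (hl : h < l.length) :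
    (l.set h v).take (h + 1) = l.take h ++ [v] := by
  rw [List.take_set, List.take_add_one, List.getElem?_eq_getElem hl]
  have hlen : (l.take h).length = h := List.length_take_of_le hl.le
  rw [List.set_append_right _ _ (by omega)]
  simp [hlen]

theorem take_set_of_le {α : Type} (l : List α) (j i : Nat) (v : α) (hj : j ≤ i) :
    (l.set i v).take j = l.take j := by
  rw [List.take_set, List.set_eq_of_length_le (by simp [List.length_take]; omega)]

theorem outerPos (code : List Int) (k : Int) :
    ∀ (f h : Nat) (arr : List Int), arr.length = code.length → h + f = code.length →
    decryptOuter code k 1 f (h : Int) (h : Int) arr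
      = arr.take h ++ (List.range f).map (fun (t : Nat) => S code ((h : Int) + (t : Int) + 1) k.natAbs) := by
  intro f
  induction f with
  | zero =>
      intro h arr hlen hh
      have : h = arr.length := by omega
      simp [decryptOuter, this]
  | succ f ih =>
      intro h arr hlen hh
      show decryptOuter code k 1 f ((h : Int) + 1) ((h : Int) + 1)
            (PySem.List.pySetD arr (1 * (h : Int)) (decryptInner code (h : Int) 1 k.natAbs 0 0)) = _
      rw [innerPos]
      rw [show (0 : Int) + S code ((h : Int) + 0 + 1) k.natAbs = S code ((h : Int) + 1) k.natAbs by ring_nf]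
      set v := S code ((h : Int) + 1) k.natAbs with hvdef
      have hset : PySem.List.pySetD arr (1 * (h : Int)) v = arr.set h v := by
        rw [one_mul, PySem.List.pySetD_natCast]
      rw [hset]
      rw [show ((h : Int) + 1) = ((h + 1 : Nat) : Int) by push_cast; ring]
      rw [ih (h + 1) (arr.set h v) (by simp [hlen]) (by omega)]
      have hhlt : h < arr.length := by omega
      rw [take_set_succ arr h v hhlt]
      rw [List.range_succ_eq_map, List.map_cons, List.map_map, List.append_assoc,
        List.singleton_append]
      have hv0 : v = S code ((h : Int) + ((0:Nat) : Int) + 1) k.natAbs := by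
        rw [hvdef, show ((h : Int) + ((0:Nat) : Int) + 1) = (h : Int) + 1 by push_cast; ring]
      have hmap : List.map (fun (t : Nat) => S code (((h+1 : Nat) : Int) + (t : Int) + 1) k.natAbs) (List.range f)
          = List.map ((fun (t : Nat) => S code ((h : Int) + (t : Int) + 1) k.natAbs) ∘ Nat.succ) (List.range f) := by
        apply List.map_congr_left
        intro t _
        simp only [Function.comp]
        congr 1
        push_cast
        ring
      rw [hmap, ← hv0]

theorem outerNeg (code : List Int) (k : Int) :
    ∀ (f h : Nat) (arr : List Int), 1 ≤ h → arr.length = code.length → h + f = code.length →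
    decryptOuter code k (-1) f (-(h : Int)) (h : Int) arr
      = arr.take 1 ++ (List.range f).map (fun (t : Nat) => S code (-((code.length : Int) - 1 - (t : Int)) - (k.natAbs : Int)) k.natAbs)
          ++ arr.drop (1 + f) := by
  intro f
  induction f with
  | zero =>
      intro h arr h1 hlen hh
      show arr = arr.take 1 ++ (List.range 0).map (fun (t : Nat) => S code (-((code.length : Int) - 1 - (t : Int)) - (k.natAbs : Int)) k.natAbs) ++ arr.drop (1 + 0)
      simp only [List.range_zero, List.map_nil, List.append_nil]
      exact (List.take_append_drop 1 arr).symm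
  | succ f ih =>
      intro h arr h1 hlen hh
      show decryptOuter code k (-1) f (-(h : Int) + -1) ((h : Int) + 1)
            (PySem.List.pySetD arr (-1 * (h : Int)) (decryptInner code (-(h : Int)) (-1) k.natAbs 0 0)) = _
      rw [innerNeg]
      set v := (0 : Int) + S code (-(h : Int) + 0 - k.natAbs) k.natAbs with hvdef
      have hfh : h + f + 1 = code.length := by omega
      have hpos : f + 1 < arr.length := by omega
      have hidx : PySem.List.pySetD arr (-1 * (h : Int)) v = arr.set (f + 1) v := by
        simp only [PySem.List.pySetD, PySem.List.pySet?, PySem.List.pyIdx?]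
        have hx : -1 * (h : Int) = -(h : Int) := by ring
        rw [hx]
        rw [if_neg (by omega), if_pos (by omega)]
        simp only [Option.map_some, Option.getD_some]
        congr 1
        omega
      rw [hidx]
      rw [show (-(h : Int) + -1) = -((h + 1 : Nat) : Int) by push_cast; ring]
      rw [show ((h : Int) + 1) = ((h + 1 : Nat) : Int) by push_cast; ring]
      rw [ih (h + 1) (arr.set (f + 1) v) (by omega) (by simp [hlen]) (by omega)]
      rw [take_set_of_le arr 1 (f + 1) v (by omega)]
      have hdropset : (arr.set (f + 1) v).drop (1 + f) = v :: arr.drop (f + 2) := by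
        rw [List.drop_set, if_neg (by omega)]
        rw [show (1 + f) = f + 1 by omega, show f + 1 - (f + 1) = 0 by omega]
        rw [List.drop_eq_getElem_cons hpos, List.set_cons_zero]
      rw [hdropset]
      rw [List.range_succ, List.map_append, List.map_singleton]
      have hvf : v = S code (-((code.length : Int) - 1 - (f : Int)) - (k.natAbs : Int)) k.natAbs := by
        rw [hvdef]
        have harg : -((code.length : Int) - 1 - (f : Int)) - (k.natAbs : Int)
            = -(h : Int) + 0 - (k.natAbs : Int) := by
          have hc : (h : Int) + (f : Int) + 1 = (code.length : Int) := by exact_mod_cast hfh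
          omega
        rw [harg]
        ring
      rw [hvf]
      rw [show 1 + (f + 1) = f + 2 by omega]
      simp only [List.append_assoc, List.singleton_append]

-- ===== k = 0 =====
theorem outerZero (code : List Int) (k : Int) (hk : k = 0) (n0 : Nat) :
    ∀ (f : Nat) (i h : Int),
    decryptOuter code k 0 f i h (List.replicate n0 (0 : Int)) = List.replicate n0 0 := by
  intro f
  induction f with
  | zero => intro i h; rfl
  | succ f ih =>
      intro i h
      show decryptOuter code k 0 f (i + 0) (h + 1)
            (PySem.List.pySetD (List.replicate n0 (0:Int)) (0 * h) (decryptInner code i 0 k.natAbs 0 0)) = _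
      have hfuel : k.natAbs = 0 := by rw [hk]; rfl
      rw [hfuel]
      show decryptOuter code k 0 f (i + 0) (h + 1)
            (PySem.List.pySetD (List.replicate n0 (0:Int)) (0 * h) 0) = _
      have : PySem.List.pySetD (List.replicate n0 (0:Int)) (0 * h) 0 = List.replicate n0 (0:Int) := by
        rw [zero_mul, show (0 : Int) = ((0 : Nat) : Int) by rfl, PySem.List.pySetD_natCast,
          List.set_replicate_self]
      rw [this, ih]

-- ===== B-side: prefix sums =====

theorem scanl_getD (code : List Int) : ∀ (a : Int) (j : Nat), j ≤ code.length →
    (List.scanl (· + ·) a code).getD j 0 = a + (code.take j).sum := by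
  induction code with
  | nil =>
      intro a j h
      have hj : j = 0 := by simpa using h
      subst hj
      simp [List.scanl]
  | cons x xs ih =>
      intro a j h
      cases j with
      | zero => simp [List.scanl]
      | succ j =>
          rw [List.scanl_cons, List.getD_cons_succ, ih (a + x) j (by simpa using h),
            List.take_succ_cons, List.sum_cons]
          ring

theorem preGet (code : List Int) (x : Int) (h0 : 0 ≤ x) (h1 : x ≤ (code.length : Int)) :
    PySem.List.pyGetD (List.scanl (· + ·) (0 : Int) code) x 0 = (code.take x.toNat).sum := by
  rw [show x = ((x.toNat : Nat) : Int) by omega, PySem.List.pyGetD_natCast]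
  rw [scanl_getD code 0 x.toNat (by omega)]
  simp
  rw [show (max x 0).toNat = x.toNat by omega]

-- the central B-value lemma: cycles + remainder window = circular sum of |k| elements from st
theorem Bval (code : List Int) (hn : 0 < code.length) (m : Nat) (st : Int) :
    PySem.Int.floordiv (m : Int) (code.length : Int) * code.sum +
      (if PySem.Int.mod st (code.length : Int) + PySem.Int.mod (m : Int) (code.length : Int) ≤ (code.length : Int)
       then PySem.List.pyGetD (List.scanl (· + ·) (0:Int) code)
              (PySem.Int.mod st (code.length : Int) + PySem.Int.mod (m : Int) (code.length : Int)) 0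
            - PySem.List.pyGetD (List.scanl (· + ·) (0:Int) code) (PySem.Int.mod st (code.length : Int)) 0
       else (PySem.List.pyGetD (List.scanl (· + ·) (0:Int) code) ((code.length : Int)) 0
            - PySem.List.pyGetD (List.scanl (· + ·) (0:Int) code) (PySem.Int.mod st (code.length : Int)) 0)
            + PySem.List.pyGetD (List.scanl (· + ·) (0:Int) code)
              (PySem.Int.mod st (code.length : Int) + PySem.Int.mod (m : Int) (code.length : Int) - (code.length : Int)) 0)
    = S code st m := by
  have hnI : (0 : Int) < (code.length : Int) := by exact_mod_cast hn
  set s := PySem.Int.mod st (code.length : Int) with hs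
  have hs0 : 0 ≤ s := PySem.Int.mod_nonneg st hnI
  have hs1 : s < (code.length : Int) := PySem.Int.mod_lt st hnI
  have hr : PySem.Int.mod (m : Int) (code.length : Int) = ((m % code.length : Nat) : Int) :=
    PySem.Int.mod_natCast m code.length
  have hq : PySem.Int.floordiv (m : Int) (code.length : Int) = ((m / code.length : Nat) : Int) :=
    PySem.Int.floordiv_natCast m code.length
  set rN := m % code.length with hrN
  set qN := m / code.length with hqN
  set sN := s.toNat with hsN
  have hsNe : s = ((sN : Nat) : Int) := by omega
  have hsNlt : sN < code.length := by omega
  have hrNlt : rN < code.length := Nat.mod_lt _ hn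
  have hwin : (if s + PySem.Int.mod (m : Int) (code.length : Int) ≤ (code.length : Int)
       then PySem.List.pyGetD (List.scanl (· + ·) (0:Int) code) (s + PySem.Int.mod (m : Int) (code.length : Int)) 0
            - PySem.List.pyGetD (List.scanl (· + ·) (0:Int) code) s 0
       else (PySem.List.pyGetD (List.scanl (· + ·) (0:Int) code) ((code.length : Int)) 0
            - PySem.List.pyGetD (List.scanl (· + ·) (0:Int) code) s 0)
            + PySem.List.pyGetD (List.scanl (· + ·) (0:Int) code) (s + PySem.Int.mod (m : Int) (code.length : Int) - (code.length : Int)) 0)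
      = S code ((sN : Nat) : Int) rN := by
    rw [hr]
    split_ifs with hcase
    · -- window inside one segment
      have hle : sN + rN ≤ code.length := by omega
      rw [preGet code (s + ((rN : Nat) : Int)) (by omega) (by omega)]
      rw [preGet code s hs0 (by omega)]
      rw [show (s + ((rN : Nat) : Int)).toNat = sN + rN by omega, show s.toNat = sN from rfl]
      rw [List.take_add, List.sum_append, S_nat_take code rN sN hle]
      ring
    · -- window wraps around the end
      have hgt : code.length < sN + rN := by omega
      rw [preGet code ((code.length : Nat) : Int) (by omega) (by omega)]
      rw [preGet code s hs0 (by omega)]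
      rw [preGet code (s + ((rN : Nat) : Int) - ((code.length : Nat) : Int)) (by omega) (by omega)]
      rw [show ((code.length : Nat) : Int).toNat = code.length by omega, show s.toNat = sN from rfl,
        show (s + ((rN : Nat) : Int) - ((code.length : Nat) : Int)).toNat = sN + rN - code.length by omega]
      have hsplit : rN = (code.length - sN) + (sN + rN - code.length) := by omega
      rw [show S code ((sN : Nat) : Int) rN
          = S code ((sN : Nat) : Int) ((code.length - sN) + (sN + rN - code.length)) by rw [← hsplit]]
      rw [S_add]
      have hpart1 : S code ((sN : Nat) : Int) (code.length - sN) = code.sum - (code.take sN).sum := by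
        rw [S_nat_take code (code.length - sN) sN (by omega)]
        rw [List.take_of_length_le (by simp only [List.length_drop]; omega)]
        have := List.sum_take_add_sum_drop code sN
        omega
      have hpart2 : S code (((sN : Nat) : Int) + ((code.length - sN : Nat) : Int)) (sN + rN - code.length)
          = (code.take (sN + rN - code.length)).sum := by
        rw [show ((sN : Nat) : Int) + ((code.length - sN : Nat) : Int)
            = (0 : Int) + 1 * (code.length : Int) by omega]
        rw [S_congr]
        rw [show (0 : Int) = ((0 : Nat) : Int) by rfl]
        rw [S_nat_take code (sN + rN - code.length) 0 (by omega)]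
        simp
      rw [hpart1, hpart2, List.take_length]
  rw [hwin, hq]
  have hdecomp : S code ((sN : Nat) : Int) m = S code ((sN : Nat) : Int) rN + (qN : Int) * code.sum := by
    rw [show m = rN + qN * code.length by rw [hrN, hqN]; exact (Nat.mod_add_div' m code.length).symm]
    rw [S_add, S_cycles code _ qN hn]
  have hcongr : S code st m = S code ((sN : Nat) : Int) m := by
    have hf := PySem.Int.floordiv_mul_add_mod st (code.length : Int)
    have hst : st = ((sN : Nat) : Int) + (PySem.Int.floordiv st (code.length : Int)) * (code.length : Int) := by
      rw [← hsNe, hs]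
      linarith
    rw [hst, S_congr]
  rw [hcongr, hdecomp]
  ring

-- final assembly helpers: characterizations of decrypt per sign
theorem decryptA_pos (code : List Int) (k : Int) (hk : 0 < k) :
    decrypt code k = (List.range code.length).map (fun (t : Nat) => S code ((t : Int) + 1) k.natAbs) := by
  show decryptOuter code k (if k > 0 then 1 else if k < 0 then -1 else 0) code.length 0 0
        (code.map (fun _ => (0:Int))) = _
  rw [if_pos hk]
  have h := outerPos code k code.length 0 (code.map (fun _ => (0:Int))) (by simp) (by omega)
  simp only [Nat.cast_zero] at h
  rw [h]
  simp only [List.take_zero, List.nil_append]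
  apply List.map_congr_left
  intro t _
  exact S_arg_congr code _ _ _ (by omega)

theorem decryptA_neg (code : List Int) (k : Int) (hk : k < 0) (hn : 0 < code.length) :
    decrypt code k = (0 + S code (0 + 0 - (k.natAbs : Int)) k.natAbs)
      :: (List.range (code.length - 1)).map
          (fun (t : Nat) => S code (-((code.length : Int) - 1 - (t : Int)) - (k.natAbs : Int)) k.natAbs) := by
  obtain ⟨nn, hnn⟩ : ∃ nn, code.length = nn + 1 := ⟨code.length - 1, by omega⟩
  show decryptOuter code k (if k > 0 then 1 else if k < 0 then -1 else 0) code.length 0 0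
        (code.map (fun _ => (0:Int))) = _
  rw [if_neg (by omega), if_pos hk]
  have harr : code.map (fun _ => (0:Int)) = List.replicate (nn + 1) 0 := by
    rw [List.map_const', hnn]
  rw [harr, hnn]
  show decryptOuter code k (-1) nn (0 + -1) (0 + 1)
        (PySem.List.pySetD (List.replicate (nn+1) (0:Int)) (-1 * 0)
          (decryptInner code 0 (-1) k.natAbs 0 0)) = _
  rw [innerNeg]
  set v := (0 : Int) + S code (0 + 0 - (k.natAbs : Int)) k.natAbs with hv
  have hset : PySem.List.pySetD (List.replicate (nn+1) (0:Int)) (-1 * 0) v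
      = v :: List.replicate nn 0 := by
    rw [show (-1 * 0 : Int) = ((0 : Nat) : Int) by ring, PySem.List.pySetD_natCast]
    simp [List.replicate_succ]
  rw [hset]
  rw [show (0 + -1 : Int) = -((1 : Nat) : Int) by norm_num,
    show (0 + 1 : Int) = ((1 : Nat) : Int) by norm_num]
  rw [outerNeg code k nn 1 (v :: List.replicate nn 0) (le_refl 1) (by simp [hnn]) (by omega)]
  rw [show List.take 1 (v :: List.replicate nn (0:Int)) = [v] from rfl]
  rw [show (1 + nn) = nn + 1 by omega]
  rw [List.drop_eq_nil_of_le (by simp : (v :: List.replicate nn (0:Int)).length ≤ nn + 1)]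
  rw [hnn, Nat.add_sub_cancel]
  simp only [List.append_nil, List.singleton_append]

theorem decrypt_eq_alt (code : List Int) (k : Int) : decrypt code k = decrypt_alt code k := by
  by_cases hn : code.length = 0
  · -- empty list
    have : code = [] := List.length_eq_zero_iff.mp hn
    subst this
    rfl
  by_cases hk0 : k = 0
  · -- k = 0: all zeros
    subst hk0
    show decryptOuter code 0 (if (0:Int) > 0 then 1 else if (0:Int) < 0 then -1 else 0)
          code.length 0 0 (code.map (fun _ => (0:Int))) = decrypt_alt code 0
    rw [if_neg (by omega), if_neg (by omega)]
    rw [List.map_const']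
    rw [outerZero code 0 rfl code.length code.length 0 0]
    show _ = if code.length = 0 ∨ (0:Int) = 0 then List.replicate code.length (0 : Int) else _
    rw [if_pos (Or.inr rfl)]
  -- main cases
  have hnpos : 0 < code.length := Nat.pos_of_ne_zero hn
  have hnI : (0 : Int) < (code.length : Int) := by exact_mod_cast hnpos
  have habs : |k| = ((k.natAbs : Nat) : Int) := by
    rw [Int.abs_eq_natAbs]
  show decrypt code k = _
  rw [show decrypt_alt code k = (List.range code.length).map (fun (i : Nat) =>
      let s := if k > 0 then PySem.Int.mod ((i : Int) + 1) (code.length : Int)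
               else PySem.Int.mod ((i : Int) - PySem.Int.mod |k| (code.length : Int)) (code.length : Int)
      let e := s + PySem.Int.mod |k| (code.length : Int)
      let window :=
        if e ≤ (code.length : Int)
        then PySem.List.pyGetD (List.scanl (· + ·) (0:Int) code) e 0
             - PySem.List.pyGetD (List.scanl (· + ·) (0:Int) code) s 0
        else (PySem.List.pyGetD (List.scanl (· + ·) (0:Int) code) ((code.length : Int)) 0
             - PySem.List.pyGetD (List.scanl (· + ·) (0:Int) code) s 0)
             + PySem.List.pyGetD (List.scanl (· + ·) (0:Int) code) (e - (code.length : Int)) 0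
      PySem.Int.floordiv |k| (code.length : Int) * code.sum + window) by
    show decrypt_alt code k = _
    unfold decrypt_alt
    rw [if_neg (by rintro (h | h) <;> [exact hn h; exact hk0 h])]]
  rcases lt_or_gt_of_ne hk0 with hkneg | hkpos
  · -- k < 0
    rw [decryptA_neg code k hkneg hnpos]
    -- B element as a circular sum
    have helem : ∀ i : Nat,
        (let s := if k > 0 then PySem.Int.mod ((i : Int) + 1) (code.length : Int)
                  else PySem.Int.mod ((i : Int) - PySem.Int.mod |k| (code.length : Int)) (code.length : Int)
         let e := s + PySem.Int.mod |k| (code.length : Int)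
         let window :=
           if e ≤ (code.length : Int)
           then PySem.List.pyGetD (List.scanl (· + ·) (0:Int) code) e 0
                - PySem.List.pyGetD (List.scanl (· + ·) (0:Int) code) s 0
           else (PySem.List.pyGetD (List.scanl (· + ·) (0:Int) code) ((code.length : Int)) 0
                - PySem.List.pyGetD (List.scanl (· + ·) (0:Int) code) s 0)
                + PySem.List.pyGetD (List.scanl (· + ·) (0:Int) code) (e - (code.length : Int)) 0
         PySem.Int.floordiv |k| (code.length : Int) * code.sum + window)
        = S code ((i : Int) - PySem.Int.mod ((k.natAbs : Nat) : Int) (code.length : Int)) k.natAbs := by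
      intro i
      simp only [if_neg (by omega : ¬ k > 0), habs]
      exact Bval code hnpos k.natAbs ((i : Int) - PySem.Int.mod ((k.natAbs : Nat) : Int) (code.length : Int))
    have hqr := PySem.Int.floordiv_mul_add_mod ((k.natAbs : Nat) : Int) (code.length : Int)
    set r := PySem.Int.mod ((k.natAbs : Nat) : Int) (code.length : Int) with hrdef
    set q := PySem.Int.floordiv ((k.natAbs : Nat) : Int) (code.length : Int) with hqdef
    have hshift : ∀ a : Int, S code (a - (k.natAbs : Int)) k.natAbs = S code (a - r) k.natAbs := by
      intro a
      have harg : a - (k.natAbs : Int) = (a - r) + (-q) * (code.length : Int) := by linarith [hqr]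
      rw [harg, S_congr]
    obtain ⟨nn, hnn⟩ : ∃ nn, code.length = nn + 1 := ⟨code.length - 1, by omega⟩
    rw [hnn] at helem ⊢
    simp only [Nat.add_sub_cancel]
    rw [List.range_succ_eq_map, List.map_cons, List.map_map]
    congr 1
    · -- first output element
      beta_reduce
      rw [helem 0]
      simp only [Nat.cast_zero]
      rw [← hshift 0]
      rw [show (0 : Int) - (k.natAbs : Int) = 0 + 0 - (k.natAbs : Int) by ring]
      ring
    · -- remaining output elements
      apply List.map_congr_left
      intro t ht
      simp only [Function.comp, Nat.succ_eq_add_one]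
      rw [helem (t + 1)]
      rw [← hshift ((t + 1 : Nat) : Int)]
      have hlenc : ((nn + 1 : Nat) : Int) = (code.length : Int) := by rw [hnn]
      have harg : ((t + 1 : Nat) : Int) - (k.natAbs : Int)
          = (-(((nn + 1 : Nat) : Int) - 1 - (t : Int)) - (k.natAbs : Int)) + ((nn + 1 : Nat) : Int) := by
        push_cast
        ring
      rw [harg, hlenc, S_shift]
  · -- k > 0
    rw [decryptA_pos code k hkpos]
    apply List.map_congr_left
    intro i hi
    beta_reduce
    simp only [if_pos hkpos, habs]
    exact (Bval code hnpos k.natAbs ((i : Int) + 1)).symm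

-- ===== VERDICT (by name: the statement is the Claim_ definition above) =====
theorem decrypt_spec : Claim_equal_decrypt := by
  intro code k _
  show decrypt code k = decrypt_alt code k
  exact decrypt_eq_alt code k
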